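-- pv_equiv track=rewrite | github.com/ShowkatOsman/Graph-Coloring-Tie-breaking | algorithms/a11_SD_LD_ID_CN.py | color_graph
-- ===== SOURCE A (Python) =====
-- from collections import defaultdict
-- import heapq
--
-- def color_graph(graph, max_node):
--     """
--     Saturation Degree coloring with tie-breakers:
--     SD → LD → ID → CN
--     """
--     coloring = {}
--     degrees = {v: len(neighbors) for v, neighbors in graph.items()}
--     cone_numbers = {v: degrees[v] + 1 for v in graph}
--     neighbor_colors = defaultdict(set)
--     id_score = defaultdict(int)
--     saturation = defaultdict(int)
--
--     # Priority: (-SD, -LD, -ID, -CN, node_id)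
--     heap = [(-0, -degrees[v], -0, -cone_numbers[v], v) for v in graph]
--     heapq.heapify(heap)
--
--     while heap:
--         _, _, _, _, v = heapq.heappop(heap)
--
--         if v in coloring:
--             continue
--
--         # Assign smallest available color
--         used = {coloring[n] for n in graph[v] if n in coloring}
--         color = 0
--         while color in used:
--             color += 1
--         coloring[v] = color
--
--         # Update neighbors
--         for neighbor in graph[v]:
--             if neighbor in coloring:
--                 continue
--
--             if color not in neighbor_colors[neighbor]:
--                 neighbor_colors[neighbor].add(color)
--                 saturation[neighbor] += 1
--
--             id_score[neighbor] += 1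
--
--             # Push updated priority into heap
--             heapq.heappush(heap, (
--                 -saturation[neighbor],
--                 -degrees[neighbor],
--                 -id_score[neighbor],
--                 -cone_numbers[neighbor],
--                 neighbor
--             ))
--
--     return coloring
-- ===== SOURCE B (Python) =====
-- def color_graph(graph, max_node):
--     """
--     Saturation Degree coloring with SD -> LD -> ID -> CN tie-breaking,
--     by direct selection: no heap, each round scans the uncolored nodes
--     for the best (saturation, degree, id_score, cone, -node) candidate.
--     """
--     coloring = {}
--     neighbor_colors = {v: set() for v in graph}
--     id_score = {v: 0 for v in graph}
--     saturation = {v: 0 for v in graph}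
--
--     while True:
--         uncolored = [u for u in graph if u not in coloring]
--         if not uncolored:
--             return coloring
--         v = min(uncolored,
--                 key=lambda u: (-saturation[u], -len(graph[u]),
--                                -id_score[u], -(len(graph[u]) + 1), u))
--
--         used = {coloring[n] for n in graph[v] if n in coloring}
--         color = 0
--         while color in used:
--             color += 1
--         coloring[v] = color
--
--         for n in graph[v]:
--             if n in coloring:
--                 continue
--             if color not in neighbor_colors[n]:
--                 neighbor_colors[n].add(color)
--                 saturation[n] += 1
--             id_score[n] += 1
-- ===== Notes on version B (the rewrite author's own statement) =====
-- stated objective: alternative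
-- what changed: Replaces the lazy heap (stale-entry priority queue with re-push on every update) by a direct per-round linear scan of the uncolored nodes for the maximal (saturation, degree, id_score, cone, -node) candidate, with plain dicts instead of defaultdicts.
import Mathlib
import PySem

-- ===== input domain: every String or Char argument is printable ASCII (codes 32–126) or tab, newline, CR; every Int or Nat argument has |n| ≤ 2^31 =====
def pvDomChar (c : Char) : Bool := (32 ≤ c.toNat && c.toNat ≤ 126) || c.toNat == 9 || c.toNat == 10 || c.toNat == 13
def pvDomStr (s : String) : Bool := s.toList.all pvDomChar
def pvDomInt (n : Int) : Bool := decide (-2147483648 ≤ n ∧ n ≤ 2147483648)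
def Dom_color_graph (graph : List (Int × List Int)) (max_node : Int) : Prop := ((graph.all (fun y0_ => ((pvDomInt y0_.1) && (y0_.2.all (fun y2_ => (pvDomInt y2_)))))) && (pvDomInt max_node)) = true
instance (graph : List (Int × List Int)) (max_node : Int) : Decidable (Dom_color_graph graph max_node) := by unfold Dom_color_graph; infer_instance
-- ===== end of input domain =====

-- B re-implements A's DSATUR coloring without the lazy heap: each round scans the
-- uncolored nodes for the best (SD, LD, ID, CN, -id) candidate directly ('alternative').

-- Python tuple comparison on the 5-tuple priorities (lexicographic on Int).
def pvLt : (Int × Int × Int × Int × Int) → (Int × Int × Int × Int × Int) → Bool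
  | (a1, a2, a3, a4, a5), (b1, b2, b3, b4, b5) =>
    if a1 < b1 then true else if b1 < a1 then false
    else if a2 < b2 then true else if b2 < a2 then false
    else if a3 < b3 then true else if b3 < a3 then false
    else if a4 < b4 then true else if b4 < a4 then false
    else decide (a5 < b5)

-- minimum of a nonempty collection of 5-tuples (what heapq.heappop extracts:
-- equal tuples are indistinguishable values, so the pop is determined by the multiset)
def pvHMin (x : Int × Int × Int × Int × Int) (xs : List (Int × Int × Int × Int × Int)) :
    Int × Int × Int × Int × Int :=
  xs.foldl (fun b c => if pvLt c b then c else b) x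

-- `while color in used: color += 1` — both Pythons contain this identical loop;
-- fuel used.length + 1 only makes it total: the scanned colors are distinct members of used.
def pvFirstFree (used : PySem.Set Int) (color : Int) : Nat → Int
  | 0 => color
  | fuel + 1 => if used.contains color then pvFirstFree used (color + 1) fuel else color

-- dict(graph): both ports decode the association-list argument into the Python dict.
def pvDict (graph : List (Int × List Int)) : PySem.Dict Int (List Int) :=
  graph.foldl (fun d p => d.insert p.1 p.2) PySem.Dict.empty

-- the tie-breaking key B's lambda computes for an uncolored node
def pvKey (g : PySem.Dict Int (List Int)) (sat idsc : PySem.Dict Int Int) (u : Int) :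
    Int × Int × Int × Int × Int :=
  (-(sat.getD u 0), -((g.getD u []).length : Int), -(idsc.getD u 0),
    -(((g.getD u []).length : Int) + 1), u)

-- ── helper facts the ports' own termination proofs cite ──
theorem pvHMin_mem (x : Int × Int × Int × Int × Int) (xs : List (Int × Int × Int × Int × Int)) :
    pvHMin x xs ∈ x :: xs := by
  unfold pvHMin
  induction xs generalizing x with
  | nil => simp
  | cons c t ih =>
    simp only [List.foldl_cons]
    rcases List.mem_cons.mp (ih (if pvLt c x then c else x)) with h | h
    · rw [h]; split_ifs <;> simp
    · exact List.mem_cons_of_mem _ (List.mem_cons_of_mem _ h)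

theorem pvMinFold_mem (key : Int → Int × Int × Int × Int × Int) (u0 : Int) (us : List Int) :
    us.foldl (fun b c => if pvLt (key c) (key b) then c else b) u0 ∈ u0 :: us := by
  induction us generalizing u0 with
  | nil => simp
  | cons c t ih =>
    simp only [List.foldl_cons]
    rcases List.mem_cons.mp (ih (if pvLt (key c) (key u0) then c else u0)) with h | h
    · rw [h]; split_ifs <;> simp
    · exact List.mem_cons_of_mem _ (List.mem_cons_of_mem _ h)

theorem pvFilter_le (l : List Int) (p q : Int → Bool) (h : ∀ a ∈ l, q a = true → p a = true) :
    (l.filter q).length ≤ (l.filter p).length := by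
  induction l with
  | nil => simp
  | cons a t ih =>
    have ht := ih (fun b hb => h b (List.mem_cons_of_mem a hb))
    by_cases hq : q a = true
    · have hp := h a (List.mem_cons_self) hq
      simp [hq, hp]; omega
    · simp only [Bool.not_eq_true] at hq
      by_cases hp : p a = true <;> simp [hq, hp] <;> omega

theorem pvFilter_lt (l : List Int) (p q : Int → Bool) (h : ∀ a ∈ l, q a = true → p a = true)
    (v : Int) (hv : v ∈ l) (hpv : p v = true) (hqv : q v = false) :
    (l.filter q).length < (l.filter p).length := by
  induction l with
  | nil => simp at hv
  | cons a t ih =>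
    have ht := pvFilter_le t p q (fun b hb => h b (List.mem_cons_of_mem a hb))
    rcases List.mem_cons.mp hv with rfl | hvt
    · simp [hpv, hqv]; omega
    · have := ih (fun b hb => h b (List.mem_cons_of_mem a hb)) hvt
      by_cases hq : q a = true
      · have hp := h a (List.mem_cons_self) hq
        simp [hq, hp]; omega
      · simp only [Bool.not_eq_true] at hq
        by_cases hp : p a = true <;> simp [hq, hp] <;> omega

theorem pvGetD_not_contains {ν : Type} (d : PySem.Dict Int ν) (k : Int) (d0 : ν)
    (h : d.contains k = false) : d.getD k d0 = d0 := by
  simp [PySem.Dict.getD, PySem.Dict.get?, PySem.Dict.contains] at *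
  rw [List.find?_eq_none.mpr]
  · rfl
  · intro p hp; simpa using h p.1 p.2 hp

theorem pvLexHelp {a a' b b' : Nat} (h1 : a' ≤ a) (h2 : b' < b) :
    Prod.Lex (· < ·) (· < ·) (a', b') (a, b) := by
  rcases Nat.lt_or_ge a' a with h | h
  · exact Prod.Lex.left _ _ h
  · have : a' = a := le_antisymm h1 h
    subst this; exact Prod.Lex.right _ h2

-- degrees = {v: len(neighbors) for v, neighbors in graph.items()}
def pvDegrees (g : PySem.Dict Int (List Int)) : PySem.Dict Int Int :=
  g.items.foldl (fun d p => d.insert p.1 (p.2.length : Int)) PySem.Dict.empty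

-- cone_numbers = {v: degrees[v] + 1 for v in graph}  (every v is a key of degrees)
def pvCones (degrees : PySem.Dict Int Int) (g : PySem.Dict Int (List Int)) : PySem.Dict Int Int :=
  g.keys.foldl (fun d v => d.insert v (degrees.getD v 0 + 1)) PySem.Dict.empty

-- the body of A's update loop over graph[v] (state: neighbor_colors, id_score, saturation, heap)
def pvStepA (degrees cones col' : PySem.Dict Int Int) (color : Int)
    (st : PySem.Dict Int (PySem.Set Int) × PySem.Dict Int Int × PySem.Dict Int Int ×
          List (Int × Int × Int × Int × Int)) (n : Int) :
    PySem.Dict Int (PySem.Set Int) × PySem.Dict Int Int × PySem.Dict Int Int ×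
      List (Int × Int × Int × Int × Int) :=
  let (ncol, idsc, sat, heap) := st
  if col'.contains n then (ncol, idsc, sat, heap)
  else
    let ncol := ncol.setdefault n (PySem.Set.ofList [])   -- defaultdict read
    let s := ncol.getD n (PySem.Set.ofList [])
    let (ncol, sat) :=
      if s.contains color then (ncol, sat)
      else (ncol.insert n (s.add color), sat.insert n (sat.getD n 0 + 1))
    let idsc := idsc.insert n (idsc.getD n 0 + 1)
    let heap := heap ++ [(-(sat.getD n 0), -(degrees.getD n 0),
                          -(idsc.getD n 0), -(cones.getD n 0), n)]   -- heappush
    (ncol, idsc, sat, heap)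

-- ===== PORT A =====
-- the while-heap loop of A; state: coloring, neighbor_colors, id_score, saturation, heap
def color_graph_loop (g : PySem.Dict Int (List Int)) (degrees cones : PySem.Dict Int Int)
    (col : PySem.Dict Int Int) (ncol : PySem.Dict Int (PySem.Set Int))
    (idsc sat : PySem.Dict Int Int) (heap : List (Int × Int × Int × Int × Int)) :
    PySem.Dict Int Int :=
  match heap with
  | [] => col
  | x :: xs =>
    let m := pvHMin x xs                                   -- heappop: the minimal tuple …
    let rest := (x :: xs).erase m                          -- … leaves the rest of the multiset
    let v := m.2.2.2.2
    if col.contains v then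
      color_graph_loop g degrees cones col ncol idsc sat rest
    else
      let nbrs := g.getD v []                              -- graph[v] (Pre_ rules out KeyError)
      let used : PySem.Set Int := PySem.Set.ofList (nbrs.filterMap (fun n => col.get? n))
      let color := pvFirstFree used 0 (used.length + 1)
      let col' := col.insert v color
      let st := nbrs.foldl (pvStepA degrees cones col' color) (ncol, idsc, sat, rest)
      color_graph_loop g degrees cones col' st.1 st.2.1 st.2.2.1 st.2.2.2
termination_by ((g.keys.filter (fun u => !col.contains u)).length, heap.length)
decreasing_by
  · exact Prod.Lex.right _ (by
      have := List.length_erase_of_mem (pvHMin_mem x xs)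
      simp at this ⊢; omega)
  · rename_i hcol
    by_cases hvk : (pvHMin x xs).2.2.2.2 ∈ g.keys
    · exact Prod.Lex.left _ _ (by
        refine pvFilter_lt _ _ _ (fun a _ hq => ?_) (pvHMin x xs).2.2.2.2 hvk
          (by simpa using hcol) (by simp)
        simp only [Bool.not_eq_true'] at hq ⊢
        simp [PySem.Dict.contains_insert] at hq ⊢; tauto)
    · have hnb : g.getD (pvHMin x xs).2.2.2.2 [] = [] := by
        apply pvGetD_not_contains
        rw [← Bool.not_eq_true, PySem.Dict.contains_iff_mem_keys]; exact hvk
      apply pvLexHelp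
      · refine pvFilter_le _ _ _ (fun a _ hq => ?_)
        simp only [Bool.not_eq_true'] at hq ⊢
        simp [PySem.Dict.contains_insert] at hq ⊢; tauto
      · rw [hnb]
        simp only [List.foldl_nil]
        have := List.length_erase_of_mem (pvHMin_mem x xs)
        simp at this ⊢; omega

def color_graph (graph : List (Int × List Int)) (max_node : Int) : List (Int × Int) :=
  let g := pvDict graph
  let degrees := pvDegrees g
  let cones := pvCones degrees g
  -- heap = [(-0, -degrees[v], -0, -cone_numbers[v], v) for v in graph]; heapify only
  -- rearranges the array, the popped values depend on the multiset alone
  let heap := g.keys.map (fun v => (-0, -(degrees.getD v 0), -0, -(cones.getD v 0), v))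
  (color_graph_loop g degrees cones PySem.Dict.empty PySem.Dict.empty
    PySem.Dict.empty PySem.Dict.empty heap).items

-- the body of B's update loop over graph[v] (state: neighbor_colors, id_score, saturation)
def pvStepB (col' : PySem.Dict Int Int) (color : Int)
    (st : PySem.Dict Int (PySem.Set Int) × PySem.Dict Int Int × PySem.Dict Int Int) (n : Int) :
    PySem.Dict Int (PySem.Set Int) × PySem.Dict Int Int × PySem.Dict Int Int :=
  let (ncol, idsc, sat) := st
  if col'.contains n then (ncol, idsc, sat)
  else
    let ncol := ncol.setdefault n (PySem.Set.ofList [])   -- s = neighbor_colors.setdefault(n, set())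
    let s := ncol.getD n (PySem.Set.ofList [])
    let (ncol, sat) :=
      if s.contains color then (ncol, sat)
      else (ncol.insert n (s.add color), sat.insert n (sat.getD n 0 + 1))
    let idsc := idsc.insert n (idsc.getD n 0 + 1)
    (ncol, idsc, sat)

-- ===== PORT B =====
-- B's while loop: select the best uncolored node by direct scan (min with the tuple key)
def color_graph_alt_loop (g : PySem.Dict Int (List Int)) (col : PySem.Dict Int Int)
    (ncol : PySem.Dict Int (PySem.Set Int)) (idsc sat : PySem.Dict Int Int) :
    PySem.Dict Int Int :=
  match hu : g.keys.filter (fun u => !col.contains u) with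
  | [] => col
  | u0 :: us =>
    let v := us.foldl (fun b c =>
      if pvLt (pvKey g sat idsc c) (pvKey g sat idsc b) then c else b) u0   -- min(uncolored, key=…)
    let nbrs := g.getD v []
    let used : PySem.Set Int := PySem.Set.ofList (nbrs.filterMap (fun n => col.get? n))
    let color := pvFirstFree used 0 (used.length + 1)
    let col' := col.insert v color
    let st := nbrs.foldl (pvStepB col' color) (ncol, idsc, sat)
    color_graph_alt_loop g col' st.1 st.2.1 st.2.2
termination_by (g.keys.filter (fun u => !col.contains u)).length
decreasing_by
  have hvm : (us.foldl (fun b c =>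
      if pvLt (pvKey g sat idsc c) (pvKey g sat idsc b) then c else b) u0) ∈ u0 :: us :=
    pvMinFold_mem _ u0 us
  rw [← hu] at hvm
  have hvk : _ ∈ g.keys := (List.mem_filter.mp hvm).1
  have hvu : (!col.contains _) = true := (List.mem_filter.mp hvm).2
  refine pvFilter_lt _ _ _ (fun a _ hq => ?_) _ hvk (by simpa using hvu) (by simp)
  simp only [Bool.not_eq_true'] at hq ⊢
  simp [PySem.Dict.contains_insert] at hq ⊢; tauto

def color_graph_alt (graph : List (Int × List Int)) (max_node : Int) : List (Int × Int) :=
  let g := pvDict graph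
  (color_graph_alt_loop g PySem.Dict.empty PySem.Dict.empty
    PySem.Dict.empty PySem.Dict.empty).items

-- ===== PRECONDITION & SPEC =====
-- Pre_ excludes exactly the inputs on which the Python raises KeyError: some listed
-- neighbour is not itself a key of the graph (degrees[neighbor] / graph[v] then fail).
def Pre_color_graph (graph : List (Int × List Int)) (max_node : Int) : Prop :=
  ∀ p ∈ graph, ∀ n ∈ p.2, n ∈ graph.map Prod.fst
instance (graph : List (Int × List Int)) (max_node : Int) :
    Decidable (Pre_color_graph graph max_node) := by unfold Pre_color_graph; infer_instance
def pvWitness_color_graph : (List (Int × List Int)) × Int := ([(0, [1]), (1, [0, 2]), (2, [1])], 5)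

def Spec_color_graph (graph : List (Int × List Int)) (max_node : Int) (out : List (Int × Int)) : Prop := out = color_graph_alt graph max_node
instance (graph : List (Int × List Int)) (max_node : Int) (out : List (Int × Int)) : Decidable (Spec_color_graph graph max_node out) := by unfold Spec_color_graph; infer_instance

-- ===== CLAIM (what is proved, stated in full; the proofs are below) =====
def Claim_equal_color_graph : Prop := ∀ (graph : List (Int × List Int)) (max_node : Int), Dom_color_graph graph max_node → Pre_color_graph graph max_node → Spec_color_graph graph max_node (color_graph graph max_node)

-- ===== LEMMAS AND PROOFS =====


def pvLtP (a b : Int × Int × Int × Int × Int) : Prop :=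
  a.1 < b.1 ∨ (a.1 = b.1 ∧ (a.2.1 < b.2.1 ∨ (a.2.1 = b.2.1 ∧ (a.2.2.1 < b.2.2.1 ∨
    (a.2.2.1 = b.2.2.1 ∧ (a.2.2.2.1 < b.2.2.2.1 ∨
      (a.2.2.2.1 = b.2.2.2.1 ∧ a.2.2.2.2 < b.2.2.2.2)))))))

theorem pvLt_iff (a b : Int × Int × Int × Int × Int) : pvLt a b = true ↔ pvLtP a b := by
  obtain ⟨a1, a2, a3, a4, a5⟩ := a
  obtain ⟨b1, b2, b3, b4, b5⟩ := b
  simp only [pvLt, pvLtP]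
  split_ifs <;> simp <;> omega

theorem pvLt_false_iff (a b : Int × Int × Int × Int × Int) :
    pvLt a b = false ↔ ¬ pvLtP a b := by
  rw [← pvLt_iff]; simp

theorem pvLt_irrefl (a : Int × Int × Int × Int × Int) : pvLt a a = false := by
  rw [pvLt_false_iff]; unfold pvLtP; omega

theorem pvLt_antisymm {a b : Int × Int × Int × Int × Int}
    (h1 : pvLt a b = false) (h2 : pvLt b a = false) : a = b := by
  rw [pvLt_false_iff] at h1 h2
  obtain ⟨a1, a2, a3, a4, a5⟩ := a
  obtain ⟨b1, b2, b3, b4, b5⟩ := b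
  unfold pvLtP at h1 h2
  simp_all [Prod.ext_iff]
  omega

theorem pvLt_neg_trans {a b c : Int × Int × Int × Int × Int}
    (h1 : pvLt b a = false) (h2 : pvLt c b = false) : pvLt c a = false := by
  rw [pvLt_false_iff] at *
  unfold pvLtP at *
  omega

theorem pvLt_total {a b : Int × Int × Int × Int × Int}
    (h : pvLt a b = false) : a = b ∨ pvLt b a = true := by
  rw [pvLt_false_iff] at h
  rw [pvLt_iff]
  obtain ⟨a1, a2, a3, a4, a5⟩ := a
  obtain ⟨b1, b2, b3, b4, b5⟩ := b
  unfold pvLtP at *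
  simp_all [Prod.ext_iff]
  omega

theorem pvLt_asymm {a b : Int × Int × Int × Int × Int}
    (h : pvLt a b = true) : pvLt b a = false := by
  rw [pvLt_iff] at h
  rw [pvLt_false_iff]
  unfold pvLtP at *
  omega

theorem pvHMin_spec (x : Int × Int × Int × Int × Int) (xs : List (Int × Int × Int × Int × Int)) :
    ∀ y ∈ x :: xs, pvLt y (pvHMin x xs) = false := by
  unfold pvHMin
  induction xs generalizing x with
  | nil => intro y hy; simp at hy; rw [hy]; exact pvLt_irrefl x
  | cons c t ih =>
    intro y hy
    simp only [List.foldl_cons]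
    have hacc := ih (if pvLt c x then c else x)
    have hr := hacc _ List.mem_cons_self
    have hx : pvLt x (if pvLt c x then c else x) = false := by
      by_cases hcx : pvLt c x = true
      · simp only [hcx, if_true]; exact pvLt_asymm hcx
      · simp only [Bool.not_eq_true] at hcx; simp only [hcx, Bool.false_eq_true, if_false]; exact pvLt_irrefl x
    have hc : pvLt c (if pvLt c x then c else x) = false := by
      by_cases hcx : pvLt c x = true
      · simp only [hcx, if_true]; exact pvLt_irrefl c
      · simp only [Bool.not_eq_true] at hcx; simp only [hcx, Bool.false_eq_true, if_false]
    rcases List.mem_cons.mp hy with h | h'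
    · rw [h]; exact pvLt_neg_trans hr hx
    · rcases List.mem_cons.mp h' with h | ht
      · rw [h]; exact pvLt_neg_trans hr hc
      · exact hacc y (List.mem_cons_of_mem _ ht)

theorem pvMinFold_eq (key : Int → Int × Int × Int × Int × Int) (us : List Int) (u0 v : Int)
    (hv : v ∈ u0 :: us)
    (hmin : ∀ u ∈ u0 :: us, u ≠ v → pvLt (key v) (key u) = true) :
    us.foldl (fun b c => if pvLt (key c) (key b) then c else b) u0 = v := by
  induction us generalizing u0 with
  | nil => simp at hv ⊢; omega
  | cons c t ih =>
    simp only [List.foldl_cons]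
    have hstep : (if pvLt (key c) (key u0) then c else u0) = v ∨ v ∈ t := by
      rcases List.mem_cons.mp hv with h | hv'
      · -- v = u0
        by_cases hc : c = v
        · left; split_ifs
          · exact hc
          · exact h.symm
        · have hcf := pvLt_asymm (hmin c (by simp) hc)
          rw [h] at hcf
          left; simp only [hcf, Bool.false_eq_true, if_false]
          exact h.symm
      · rcases List.mem_cons.mp hv' with h | hvt
        · -- v = c
          by_cases hu : u0 = v
          · left; split_ifs
            · exact h.symm
            · exact hu
          · have ht := hmin u0 (by simp) hu
            rw [h] at ht
            left; simp only [ht, if_true]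
            exact h.symm
        · right; exact hvt
    have hmem : (if pvLt (key c) (key u0) then c else u0) ∈ u0 :: c :: t := by
      split_ifs <;> simp
    have hmin' : ∀ u ∈ (if pvLt (key c) (key u0) then c else u0) :: t, u ≠ v →
        pvLt (key v) (key u) = true := by
      intro u hu hne
      rcases List.mem_cons.mp hu with h | hut
      · refine hmin u ?_ hne
        rw [h]; exact hmem
      · exact hmin u (by simp [hut]) hne
    rcases hstep with h | h
    · exact ih _ (List.mem_cons.mpr (Or.inl h.symm)) hmin'
    · exact ih _ (List.mem_cons.mpr (Or.inr h)) hmin'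

theorem pvGetD_foldl_insert {ν : Type} (l : List Int) (w : Int → ν) (d : PySem.Dict Int ν)
    (u : Int) (d0 : ν) :
    (l.foldl (fun d k => d.insert k (w k)) d).getD u d0 =
      if u ∈ l then w u else d.getD u d0 := by
  induction l generalizing d with
  | nil => simp
  | cons k t ih =>
    simp only [List.foldl_cons]
    rw [ih]
    by_cases hut : u ∈ t
    · simp [hut]
    · rw [PySem.Dict.getD_insert]
      by_cases huk : u = k <;> simp [hut, huk]

theorem pvGetD_foldl_insert_pairs {ν : Type} (l : List (Int × ν)) (d : PySem.Dict Int ν)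
    (u : Int) (d0 : ν) :
    (l.foldl (fun d p => d.insert p.1 p.2) d).getD u d0 =
      (match l.reverse.find? (fun p => p.1 == u) with
       | some p => p.2
       | none => d.getD u d0) := by
  induction l generalizing d with
  | nil => simp
  | cons p t ih =>
    simp only [List.foldl_cons, List.reverse_cons]
    rw [ih, List.find?_append]
    cases hf : t.reverse.find? (fun p => p.1 == u) with
    | some q => simp
    | none =>
      by_cases hpu : p.1 = u
      · simp [List.find?, hpu]
      · have hne : (p.1 == u) = false := by simp [hpu]
        simp [List.find?, hne, PySem.Dict.getD_insert, Ne.symm hpu]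

theorem pvKeys_mem (graph : List (Int × List Int)) (u : Int) :
    u ∈ (pvDict graph).keys ↔ u ∈ graph.map Prod.fst := by
  unfold pvDict
  rw [PySem.Dict.keys_foldl_insert_key graph Prod.fst (fun _ p => p.2) PySem.Dict.empty]
  rw [PySem.Set.mem_update]
  simp [PySem.Dict.keys_empty]

theorem pvKeys_nodup (graph : List (Int × List Int)) : (pvDict graph).keys.Nodup := by
  unfold pvDict
  exact PySem.Dict.nodup_keys_foldl_insert_key graph Prod.fst (fun _ p => p.2) PySem.Dict.empty
    (by rw [PySem.Dict.keys_empty]; exact List.nodup_nil)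

theorem pvDict_getD_cases (graph : List (Int × List Int)) (u : Int) :
    (pvDict graph).getD u [] = [] ∨ ∃ p ∈ graph, p.1 = u ∧ (pvDict graph).getD u [] = p.2 := by
  unfold pvDict
  rw [pvGetD_foldl_insert_pairs]
  cases hf : graph.reverse.find? (fun p => p.1 == u) with
  | none => left; simp [PySem.Dict.getD_empty]
  | some p =>
    right
    refine ⟨p, List.mem_reverse.mp (List.mem_of_find?_eq_some hf), ?_, rfl⟩
    have := List.find?_some hf
    simpa using this

theorem pvClosure (graph : List (Int × List Int))
    (hpre : ∀ p ∈ graph, ∀ n ∈ p.2, n ∈ graph.map Prod.fst) :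
    ∀ u, ∀ n ∈ (pvDict graph).getD u [], n ∈ (pvDict graph).keys := by
  intro u n hn
  rcases pvDict_getD_cases graph u with h | ⟨p, hp, _, h⟩
  · rw [h] at hn; simp at hn
  · rw [h] at hn
    exact (pvKeys_mem graph n).mpr (hpre p hp n hn)

theorem pvDegrees_getD (g : PySem.Dict Int (List Int)) (hnd : g.keys.Nodup) (u : Int)
    (hu : u ∈ g.keys) : (pvDegrees g).getD u 0 = ((g.getD u []).length : Int) := by
  unfold pvDegrees
  rw [PySem.Dict.items_eq_map_keys g hnd ([] : List Int), List.foldl_map]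
  rw [pvGetD_foldl_insert g.keys (fun k => ((g.getD k []).length : Int)) PySem.Dict.empty u 0]
  simp [hu]

theorem pvCones_getD (degrees : PySem.Dict Int Int) (g : PySem.Dict Int (List Int)) (u : Int)
    (hu : u ∈ g.keys) : (pvCones degrees g).getD u 0 = degrees.getD u 0 + 1 := by
  unfold pvCones
  rw [pvGetD_foldl_insert g.keys (fun v => degrees.getD v 0 + 1) PySem.Dict.empty u 0]
  simp [hu]

theorem pvKey_congr (g : PySem.Dict Int (List Int)) (sat idsc sat' idsc' : PySem.Dict Int Int)
    (u : Int) (h1 : sat.getD u 0 = sat'.getD u 0) (h2 : idsc.getD u 0 = idsc'.getD u 0) :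
    pvKey g sat idsc u = pvKey g sat' idsc' u := by
  unfold pvKey; rw [h1, h2]

theorem pvKey_mono (g : PySem.Dict Int (List Int)) (sat idsc sat' idsc' : PySem.Dict Int Int)
    (u : Int) (h1 : sat.getD u 0 ≤ sat'.getD u 0) (h2 : idsc.getD u 0 ≤ idsc'.getD u 0) :
    pvLt (pvKey g sat idsc u) (pvKey g sat' idsc' u) = false := by
  rw [pvLt_false_iff]; unfold pvKey pvLtP; simp; omega

theorem pvKey_node (g : PySem.Dict Int (List Int)) (sat idsc : PySem.Dict Int Int) (u : Int) :
    (pvKey g sat idsc u).2.2.2.2 = u := rfl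

theorem pvStep_proj (degrees cones col' : PySem.Dict Int Int) (color : Int)
    (st : PySem.Dict Int (PySem.Set Int) × PySem.Dict Int Int × PySem.Dict Int Int ×
          List (Int × Int × Int × Int × Int)) (n : Int) :
    ((pvStepA degrees cones col' color st n).1,
     (pvStepA degrees cones col' color st n).2.1,
     (pvStepA degrees cones col' color st n).2.2.1) =
      pvStepB col' color (st.1, st.2.1, st.2.2.1) n := by
  obtain ⟨ncol, idsc, sat, heap⟩ := st
  unfold pvStepA pvStepB
  split_ifs <;> rfl

theorem pvFold_proj (degrees cones col' : PySem.Dict Int Int) (color : Int) (ns : List Int)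
    (st : PySem.Dict Int (PySem.Set Int) × PySem.Dict Int Int × PySem.Dict Int Int ×
          List (Int × Int × Int × Int × Int)) :
    ((ns.foldl (pvStepA degrees cones col' color) st).1,
     (ns.foldl (pvStepA degrees cones col' color) st).2.1,
     (ns.foldl (pvStepA degrees cones col' color) st).2.2.1) =
      ns.foldl (pvStepB col' color) (st.1, st.2.1, st.2.2.1) := by
  induction ns generalizing st with
  | nil => rfl
  | cons n t ih =>
    simp only [List.foldl_cons]
    rw [← pvStep_proj degrees cones col' color st n]
    exact ih _


theorem pvPush_inv (g : PySem.Dict Int (List Int)) (col' : PySem.Dict Int Int)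
    (n : Int) (hnk : n ∈ g.keys)
    (sat idsc sat' idsc' : PySem.Dict Int Int)
    (heap : List (Int × Int × Int × Int × Int))
    (hs : ∀ u, sat.getD u 0 ≤ sat'.getD u 0) (hi : ∀ u, idsc.getD u 0 ≤ idsc'.getD u 0)
    (heq : ∀ u, u ≠ n → sat.getD u 0 = sat'.getD u 0 ∧ idsc.getD u 0 = idsc'.getD u 0)
    (hA : ∀ e ∈ heap, e.2.2.2.2 ∈ g.keys ∧ pvLt e (pvKey g sat idsc e.2.2.2.2) = false)
    (hB : ∀ u ∈ g.keys, col'.contains u = false → pvKey g sat idsc u ∈ heap) :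
    (∀ e ∈ heap ++ [pvKey g sat' idsc' n], e.2.2.2.2 ∈ g.keys ∧
        pvLt e (pvKey g sat' idsc' e.2.2.2.2) = false) ∧
    (∀ u ∈ g.keys, col'.contains u = false →
        pvKey g sat' idsc' u ∈ heap ++ [pvKey g sat' idsc' n]) := by
  have hmon : ∀ u, pvLt (pvKey g sat idsc u) (pvKey g sat' idsc' u) = false :=
    fun u => pvKey_mono g sat idsc sat' idsc' u (hs u) (hi u)
  constructor
  · intro e he
    rcases List.mem_append.mp he with h | h
    · exact ⟨(hA e h).1, pvLt_neg_trans (hmon e.2.2.2.2) (hA e h).2⟩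
    · simp only [List.mem_singleton] at h
      rw [h, pvKey_node]
      exact ⟨hnk, pvLt_irrefl _⟩
  · intro u hu hcu
    by_cases hun : u = n
    · rw [hun]; exact List.mem_append.mpr (Or.inr (List.mem_singleton.mpr rfl))
    · rw [← pvKey_congr g sat idsc sat' idsc' u (heq u hun).1 (heq u hun).2]
      exact List.mem_append.mpr (Or.inl (hB u hu hcu))

theorem pvStep_inv (g : PySem.Dict Int (List Int)) (degrees cones : PySem.Dict Int Int)
    (hdeg : ∀ u ∈ g.keys, degrees.getD u 0 = ((g.getD u []).length : Int))
    (hcone : ∀ u ∈ g.keys, cones.getD u 0 = ((g.getD u []).length : Int) + 1)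
    (col' : PySem.Dict Int Int) (color : Int) (n : Int) (hnk : n ∈ g.keys)
    (st : PySem.Dict Int (PySem.Set Int) × PySem.Dict Int Int × PySem.Dict Int Int ×
          List (Int × Int × Int × Int × Int))
    (hA : ∀ e ∈ st.2.2.2, e.2.2.2.2 ∈ g.keys ∧
            pvLt e (pvKey g st.2.2.1 st.2.1 e.2.2.2.2) = false)
    (hB : ∀ u ∈ g.keys, col'.contains u = false → pvKey g st.2.2.1 st.2.1 u ∈ st.2.2.2) :
    (∀ e ∈ (pvStepA degrees cones col' color st n).2.2.2, e.2.2.2.2 ∈ g.keys ∧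
        pvLt e (pvKey g (pvStepA degrees cones col' color st n).2.2.1
          (pvStepA degrees cones col' color st n).2.1 e.2.2.2.2) = false) ∧
    (∀ u ∈ g.keys, col'.contains u = false →
        pvKey g (pvStepA degrees cones col' color st n).2.2.1
          (pvStepA degrees cones col' color st n).2.1 u ∈
          (pvStepA degrees cones col' color st n).2.2.2) := by
  obtain ⟨ncol, idsc, sat, heap⟩ := st
  unfold pvStepA
  by_cases hcn : col'.contains n = true
  · simp only [hcn, if_true]
    exact ⟨hA, hB⟩
  · simp only [Bool.not_eq_true] at hcn
    simp only [hcn, Bool.false_eq_true, if_false]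
    by_cases hsc : ((ncol.setdefault n (PySem.Set.ofList [])).getD n
        (PySem.Set.ofList [])).contains color = true
    · simp only [hsc, if_true]
      have hkey : (-(sat.getD n 0), -(degrees.getD n 0),
          -((idsc.insert n (idsc.getD n 0 + 1)).getD n 0), -(cones.getD n 0), n)
          = pvKey g sat (idsc.insert n (idsc.getD n 0 + 1)) n := by
        unfold pvKey
        rw [hdeg n hnk, hcone n hnk]
      rw [hkey]
      refine pvPush_inv g col' n hnk sat idsc sat (idsc.insert n (idsc.getD n 0 + 1)) heap
        (fun u => le_refl _) ?_ ?_ hA hB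
      · intro u
        rw [PySem.Dict.getD_insert]
        by_cases hun : u = n <;> simp [hun]
      · intro u hun
        rw [PySem.Dict.getD_insert]
        simp [hun]
    · simp only [Bool.not_eq_true] at hsc
      simp only [hsc, Bool.false_eq_true, if_false]
      have hkey : (-((sat.insert n (sat.getD n 0 + 1)).getD n 0), -(degrees.getD n 0),
          -((idsc.insert n (idsc.getD n 0 + 1)).getD n 0), -(cones.getD n 0), n)
          = pvKey g (sat.insert n (sat.getD n 0 + 1)) (idsc.insert n (idsc.getD n 0 + 1)) n := by
        unfold pvKey
        rw [hdeg n hnk, hcone n hnk]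
      rw [hkey]
      refine pvPush_inv g col' n hnk sat idsc (sat.insert n (sat.getD n 0 + 1))
        (idsc.insert n (idsc.getD n 0 + 1)) heap ?_ ?_ ?_ hA hB
      · intro u
        rw [PySem.Dict.getD_insert]
        by_cases hun : u = n <;> simp [hun]
      · intro u
        rw [PySem.Dict.getD_insert]
        by_cases hun : u = n <;> simp [hun]
      · intro u hun
        rw [PySem.Dict.getD_insert, PySem.Dict.getD_insert]
        simp [hun]

theorem pvFold_inv (g : PySem.Dict Int (List Int)) (degrees cones : PySem.Dict Int Int)
    (hdeg : ∀ u ∈ g.keys, degrees.getD u 0 = ((g.getD u []).length : Int))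
    (hcone : ∀ u ∈ g.keys, cones.getD u 0 = ((g.getD u []).length : Int) + 1)
    (col' : PySem.Dict Int Int) (color : Int)
    (ns : List Int) (hns : ∀ n ∈ ns, n ∈ g.keys)
    (st : PySem.Dict Int (PySem.Set Int) × PySem.Dict Int Int × PySem.Dict Int Int ×
          List (Int × Int × Int × Int × Int))
    (hA : ∀ e ∈ st.2.2.2, e.2.2.2.2 ∈ g.keys ∧
            pvLt e (pvKey g st.2.2.1 st.2.1 e.2.2.2.2) = false)
    (hB : ∀ u ∈ g.keys, col'.contains u = false → pvKey g st.2.2.1 st.2.1 u ∈ st.2.2.2) :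
    (∀ e ∈ (ns.foldl (pvStepA degrees cones col' color) st).2.2.2, e.2.2.2.2 ∈ g.keys ∧
        pvLt e (pvKey g (ns.foldl (pvStepA degrees cones col' color) st).2.2.1
          (ns.foldl (pvStepA degrees cones col' color) st).2.1 e.2.2.2.2) = false) ∧
    (∀ u ∈ g.keys, col'.contains u = false →
        pvKey g (ns.foldl (pvStepA degrees cones col' color) st).2.2.1
          (ns.foldl (pvStepA degrees cones col' color) st).2.1 u ∈
          (ns.foldl (pvStepA degrees cones col' color) st).2.2.2) := by
  induction ns generalizing st with
  | nil => exact ⟨hA, hB⟩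
  | cons n t ih =>
    simp only [List.foldl_cons]
    have hstep := pvStep_inv g degrees cones hdeg hcone col' color n
      (hns n List.mem_cons_self) st hA hB
    exact ih (fun m hm => hns m (List.mem_cons_of_mem _ hm)) _ hstep.1 hstep.2

theorem pvLoop_eq (g : PySem.Dict Int (List Int)) (degrees cones : PySem.Dict Int Int)
    (hdeg : ∀ u ∈ g.keys, degrees.getD u 0 = ((g.getD u []).length : Int))
    (hcone : ∀ u ∈ g.keys, cones.getD u 0 = ((g.getD u []).length : Int) + 1)
    (hclo : ∀ u, ∀ n ∈ g.getD u [], n ∈ g.keys) :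
    ∀ (col : PySem.Dict Int Int) (ncol : PySem.Dict Int (PySem.Set Int))
      (idsc sat : PySem.Dict Int Int) (heap : List (Int × Int × Int × Int × Int)),
    (∀ e ∈ heap, e.2.2.2.2 ∈ g.keys ∧ pvLt e (pvKey g sat idsc e.2.2.2.2) = false) →
    (∀ u ∈ g.keys, col.contains u = false → pvKey g sat idsc u ∈ heap) →
    color_graph_loop g degrees cones col ncol idsc sat heap =
      color_graph_alt_loop g col ncol idsc sat := by
  intro col ncol idsc sat heap
  induction col, ncol, idsc, sat, heap using color_graph_loop.induct g degrees cones with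
  | case1 col ncol idsc sat =>
    intro hA hB
    have hfe : g.keys.filter (fun u => !col.contains u) = [] := by
      rw [List.filter_eq_nil_iff]
      intro u hu
      simp only [Bool.not_eq_true', Bool.not_eq_false]
      by_contra h
      simp only [Bool.not_eq_true] at h
      exact absurd (hB u hu h) (List.not_mem_nil)
    rw [color_graph_loop, color_graph_alt_loop.eq_def]
    split
    · rfl
    · rename_i heq
      rw [hfe] at heq
      cases heq
  | case2 col ncol idsc sat x xs m rest v hcol ih =>
    intro hA hB
    have hcol' : col.contains (pvHMin x xs).2.2.2.2 = true := hcol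
    rw [color_graph_loop]
    simp only [hcol', if_true]
    apply ih
    · intro e he
      exact hA e (List.mem_of_mem_erase he)
    · intro u hu hcu
      have hne : pvKey g sat idsc u ≠ pvHMin x xs := by
        intro h
        have hun : u = (pvHMin x xs).2.2.2.2 := by rw [← h, pvKey_node]
        rw [hun, hcol'] at hcu
        cases hcu
      exact (List.mem_erase_of_ne hne).mpr (hB u hu hcu)
  | case3 col ncol idsc sat x xs m rest v hcol nbrs used color col' st ih =>
    intro hA hB
    have hmem := pvHMin_mem x xs
    have hcol' : col.contains (pvHMin x xs).2.2.2.2 = false := by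
      have : ¬ col.contains (pvHMin x xs).2.2.2.2 = true := hcol
      simpa using this
    have hvk : (pvHMin x xs).2.2.2.2 ∈ g.keys := (hA _ hmem).1
    have hkeymem : pvKey g sat idsc (pvHMin x xs).2.2.2.2 ∈ x :: xs :=
      hB _ hvk hcol'
    have hmkey : pvHMin x xs = pvKey g sat idsc (pvHMin x xs).2.2.2.2 :=
      pvLt_antisymm (hA _ hmem).2 (pvHMin_spec x xs _ hkeymem)
    rw [color_graph_loop]
    simp only [hcol', Bool.false_eq_true, if_false]
    rw [color_graph_alt_loop.eq_def]
    split
    · rename_i heq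
      exfalso
      have hvin : (pvHMin x xs).2.2.2.2 ∈ g.keys.filter (fun u => !col.contains u) := by
        rw [List.mem_filter]
        exact ⟨hvk, by simp [hcol']⟩
      rw [heq] at hvin
      exact List.not_mem_nil hvin
    · rename_i u0 us heq
      have hsel : us.foldl (fun b c =>
          if pvLt (pvKey g sat idsc c) (pvKey g sat idsc b) then c else b) u0
          = (pvHMin x xs).2.2.2.2 := by
        apply pvMinFold_eq
        · rw [← heq, List.mem_filter]
          exact ⟨hvk, by simp [hcol']⟩
        · intro u hu hune
          rw [← heq, List.mem_filter] at hu
          have hukey : pvKey g sat idsc u ∈ x :: xs :=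
            hB u hu.1 (by simpa using hu.2)
          have h1 : pvLt (pvKey g sat idsc u) (pvHMin x xs) = false :=
            pvHMin_spec x xs _ hukey
          rw [hmkey] at h1
          rcases pvLt_total h1 with h | h
          · exfalso
            apply hune
            have hcc := congrArg (fun t : Int × Int × Int × Int × Int => t.2.2.2.2) h
            simpa [pvKey_node] using hcc
          · exact h
      rw [hsel]
      -- state the A-side and B-side tails with the case's abbreviations
      have hbinv : ∀ u ∈ g.keys, col'.contains u = false →
          pvKey g sat idsc u ∈ rest := by
        intro u hu hcu
        have hcu' : (PySem.Dict.contains (col.insert (pvHMin x xs).2.2.2.2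
            (pvFirstFree (PySem.Set.ofList ((g.getD (pvHMin x xs).2.2.2.2 []).filterMap
              (fun n => col.get? n))) 0
              ((PySem.Set.ofList ((g.getD (pvHMin x xs).2.2.2.2 []).filterMap
                (fun n => col.get? n))).length + 1))) u) = false := hcu
        simp only [PySem.Dict.contains_insert, Bool.or_eq_false_iff,
          beq_eq_false_iff_ne] at hcu'
        have hne : pvKey g sat idsc u ≠ pvHMin x xs := by
          intro h
          apply hcu'.1
          rw [← pvKey_node g sat idsc u, h]
        exact (List.mem_erase_of_ne hne).mpr (hB u hu hcu'.2)
      have hinv := pvFold_inv g degrees cones hdeg hcone col' color nbrs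
        (hclo _) (ncol, idsc, sat, rest) (fun e he => hA e (List.mem_of_mem_erase he)) hbinv
      have heqr : color_graph_loop g degrees cones col' st.1 st.2.1 st.2.2.1 st.2.2.2 =
          color_graph_alt_loop g col' st.1 st.2.1 st.2.2.1 := ih hinv.1 hinv.2
      have hproj := pvFold_proj degrees cones col' color nbrs (ncol, idsc, sat, rest)
      have h1 : st.1 = (nbrs.foldl (pvStepB col' color) (ncol, idsc, sat)).1 :=
        congrArg (fun t : PySem.Dict Int (PySem.Set Int) × PySem.Dict Int Int ×
          PySem.Dict Int Int => t.1) hproj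
      have h2 : st.2.1 = (nbrs.foldl (pvStepB col' color) (ncol, idsc, sat)).2.1 :=
        congrArg (fun t : PySem.Dict Int (PySem.Set Int) × PySem.Dict Int Int ×
          PySem.Dict Int Int => t.2.1) hproj
      have h3 : st.2.2.1 = (nbrs.foldl (pvStepB col' color) (ncol, idsc, sat)).2.2 :=
        congrArg (fun t : PySem.Dict Int (PySem.Set Int) × PySem.Dict Int Int ×
          PySem.Dict Int Int => t.2.2) hproj
      calc color_graph_loop g degrees cones col' st.1 st.2.1 st.2.2.1 st.2.2.2
          = color_graph_alt_loop g col' st.1 st.2.1 st.2.2.1 := heqr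
        _ = color_graph_alt_loop g col' (nbrs.foldl (pvStepB col' color) (ncol, idsc, sat)).1
              (nbrs.foldl (pvStepB col' color) (ncol, idsc, sat)).2.1
              (nbrs.foldl (pvStepB col' color) (ncol, idsc, sat)).2.2 := by
            rw [h1, h2, h3]

theorem pvInit_key (graph : List (Int × List Int)) (v : Int) (hv : v ∈ (pvDict graph).keys) :
    (-0, -((pvDegrees (pvDict graph)).getD v 0), -0,
      -((pvCones (pvDegrees (pvDict graph)) (pvDict graph)).getD v 0), v)
      = pvKey (pvDict graph) PySem.Dict.empty PySem.Dict.empty v := by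
  unfold pvKey
  rw [PySem.Dict.getD_empty,
    pvCones_getD (pvDegrees (pvDict graph)) (pvDict graph) v hv,
    pvDegrees_getD (pvDict graph) (pvKeys_nodup graph) v hv]


-- ===== VERDICT (by name: the statement is the Claim_ definition above) =====
theorem color_graph_spec : Claim_equal_color_graph := by
  unfold Claim_equal_color_graph
  intro graph max_node hdom hpre
  unfold Spec_color_graph color_graph color_graph_alt
  refine congrArg PySem.Dict.items ?_
  apply pvLoop_eq (pvDict graph) (pvDegrees (pvDict graph))
    (pvCones (pvDegrees (pvDict graph)) (pvDict graph))
  · exact fun u hu => pvDegrees_getD (pvDict graph) (pvKeys_nodup graph) u hu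
  · intro u hu
    rw [pvCones_getD (pvDegrees (pvDict graph)) (pvDict graph) u hu,
      pvDegrees_getD (pvDict graph) (pvKeys_nodup graph) u hu]
  · exact pvClosure graph hpre
  · intro e he
    obtain ⟨v, hv, rfl⟩ := List.mem_map.mp he
    rw [pvInit_key graph v hv]
    exact ⟨hv, pvLt_irrefl _⟩
  · intro u hu _
    exact List.mem_map.mpr ⟨u, hu, pvInit_key graph u hu⟩
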